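-- pv_equiv track=rewrite | github.com/shinkeonkim/today-ps | BOJ/03000~03999/3000~3099/3060.py | f
-- ===== SOURCE A (Python) =====
-- def f(mid):
--     if mid < 1:
--         return 1
--     elif mid == 1:
--         return 4
--     else:
--         a = f(mid//2)
--         if mid % 2 == 0:
--             return a*a
--         else:
--             return a*a*4
-- ===== SOURCE B (Python) =====
-- def f(mid):
--     # closed form of the recursive square-and-multiply
--     return 4 ** mid if mid >= 1 else 1
-- ===== Notes on version B (the rewrite author's own statement) =====
-- stated objective: simpler
-- what changed: Replaced the recursive square-and-multiply computation with a single closed-form builtin power expression.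
import Mathlib
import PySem

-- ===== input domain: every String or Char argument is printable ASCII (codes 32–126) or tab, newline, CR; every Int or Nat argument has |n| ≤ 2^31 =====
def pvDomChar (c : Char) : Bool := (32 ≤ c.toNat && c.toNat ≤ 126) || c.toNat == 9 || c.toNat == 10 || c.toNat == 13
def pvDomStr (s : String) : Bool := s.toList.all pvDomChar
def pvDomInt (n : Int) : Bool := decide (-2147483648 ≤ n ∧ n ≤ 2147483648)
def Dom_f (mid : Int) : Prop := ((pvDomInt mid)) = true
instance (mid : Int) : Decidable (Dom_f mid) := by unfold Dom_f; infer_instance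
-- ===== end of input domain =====

-- B replaces the recursive square-and-multiply with a single closed-form builtin power expression (simpler).

-- ===== PORT A =====
def f (mid : Int) : Int :=
  if mid < 1 then 1
  else if mid = 1 then 4
  else
    let a := f (PySem.Int.floordiv mid 2)
    if PySem.Int.mod mid 2 = 0 then a * a else a * a * 4
termination_by mid.toNat
decreasing_by
  simp only [PySem.Int.floordiv]
  rw [Int.fdiv_eq_ediv]
  simp only [show ((0:Int) ≤ 2 ∨ 2 ∣ mid) from Or.inl (by norm_num), if_pos]
  omega

-- ===== PORT B =====
def f_alt (mid : Int) : Int :=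
  if mid ≥ 1 then 4 ^ mid.toNat else 1

-- ===== PRECONDITION & SPEC =====
def Spec_f (mid : Int) (out : Int) : Prop := out = f_alt mid
instance (mid : Int) (out : Int) : Decidable (Spec_f mid out) := by unfold Spec_f; infer_instance

-- ===== CLAIM (what is proved, stated in full; the proofs are below) =====
def Claim_equal_f : Prop := ∀ (mid : Int), Dom_f mid → Spec_f mid (f mid)

-- ===== LEMMAS AND PROOFS =====

theorem pv_fdiv_two (mid : Int) : PySem.Int.floordiv mid 2 = mid / 2 := by
  simp only [PySem.Int.floordiv]
  rw [Int.fdiv_eq_ediv]; simp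

theorem pv_fmod_two (mid : Int) : PySem.Int.mod mid 2 = mid % 2 := by
  simp only [PySem.Int.mod]
  rw [Int.fmod_eq_emod]; simp

theorem f_closed (mid : Int) : f mid = if mid ≥ 1 then 4 ^ mid.toNat else 1 := by
  induction mid using f.induct with
  | case1 mid h =>
    rw [f]
    rw [if_pos h, if_neg (by omega : ¬ mid ≥ 1)]
  | case2 mid =>
    rw [f]
    norm_num
  | case3 mid h h1 hmod ih =>
    rw [f]
    simp only [if_neg h, if_neg h1, if_pos hmod]
    rw [ih, pv_fdiv_two]
    rw [pv_fmod_two] at hmod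
    have hge : (1:Int) ≤ mid / 2 := by omega
    have hn : mid.toNat = 2 * (mid / 2).toNat := by omega
    rw [if_pos hge, if_pos (by omega : mid ≥ 1), hn, two_mul, pow_add]
  | case4 mid h h1 hmod ih =>
    rw [f]
    simp only [if_neg h, if_neg h1, if_neg hmod]
    rw [ih, pv_fdiv_two]
    rw [pv_fmod_two] at hmod
    have hge : (1:Int) ≤ mid / 2 := by omega
    have hn : mid.toNat = 2 * (mid / 2).toNat + 1 := by omega
    rw [if_pos hge, if_pos (by omega : mid ≥ 1), hn, pow_succ, two_mul, pow_add]

-- ===== VERDICT (by name: the statement is the Claim_ definition above) =====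
theorem f_spec : Claim_equal_f := by
  intro mid _
  unfold Spec_f f_alt
  exact f_closed mid
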